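-- pv_equiv track=rewrite | github.com/miliar/Code_Jam_Webscraper | solutions_python/solutions_year17_round1_nr1/391.py | solve
-- ===== SOURCE A (Python) =====
-- def all_question_marks(row):
--     for x in row:
--         if x != '?':
--             return False
--
--     return True
--
-- def fill_previous(i, c, row):
--     i -= 1
--     while i >= 0 and row[i] == '?':
--         row[i] = c
--         i -= 1
--
-- def fill_row(row):
--     for i, c in enumerate(row):
--         if c != '?':
--             fill_previous(i, c, row)
--
--     #find final non question mark character
--     for i in range(len(row) - 1, -1, -1):
--         if row[i] != '?':
--             #make rest of list the same
--             for j in range(i+1, len(row)):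
--                 row[j] = row[i]
--
--             break
--
-- def solve(A):
--     # fill in non all question mark rows
--     for row in A:
--         if all_question_marks(row):
--             continue
--         else:
--             fill_row(row)
--
--     #find first non all question mark row
--     i = 0
--     while all_question_marks(A[i]):
--         i += 1
--
--     #make all preceding rows the same as first non all question marks row
--     for j in range(0, i):
--         A[j] = [x for x in A[i]]
--
--     for j in range(i, len(A)):
--         if all_question_marks(A[j]): #make same as previous row
--             A[j] = [x for x in A[j-1]]
--
--     return A
-- ===== SOURCE B (Python) =====
-- # B: same return value as A, but built as a new grid (A mutates its argument in
-- # place; equivalence is about the return value only). Horizontal phase: two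
-- # accumulator scans per row instead of per-letter backward fills; vertical
-- # phase: one top-down scan carrying the previous filled row.
-- def solve(A):
--     def horiz(row):
--         out = list(row)
--         last = '?'
--         for i in range(len(out) - 1, -1, -1):   # nearest letter to the right
--             if out[i] != '?':
--                 last = out[i]
--             else:
--                 out[i] = last
--         last = '?'
--         for i in range(len(out)):               # trailing '?' get the left letter
--             if out[i] != '?':
--                 last = out[i]
--             else:
--                 out[i] = last
--         return out
--
--     rows = [horiz(r) if any(c != '?' for c in r) else list(r) for r in A]
--     first = next(r for r in rows if any(c != '?' for c in r))  # raises if no letter anywhere (A raises IndexError there too)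
--     out = []
--     prev = first
--     for row in rows:
--         cur = list(row) if any(c != '?' for c in row) else list(prev)
--         out.append(cur)
--         prev = cur
--     return out
-- ===== Notes on version B (the rewrite author's own statement) =====
-- stated objective: alternative
-- what changed: Horizontal phase replaces the per-letter backward fill_previous loops plus a find-last-letter copy pass by two whole-row accumulator scans (right-to-left nearest-letter, then left-to-right for the trailing run), and the vertical index/copy loops by a single top-down scan carrying the previous filled row; B builds a new grid instead of mutating A in place (return values agree). Pre_ excludes grids with no non-'?' cell (including the empty grid), where A raises IndexError (B raises StopIteration).
import Mathlib
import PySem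

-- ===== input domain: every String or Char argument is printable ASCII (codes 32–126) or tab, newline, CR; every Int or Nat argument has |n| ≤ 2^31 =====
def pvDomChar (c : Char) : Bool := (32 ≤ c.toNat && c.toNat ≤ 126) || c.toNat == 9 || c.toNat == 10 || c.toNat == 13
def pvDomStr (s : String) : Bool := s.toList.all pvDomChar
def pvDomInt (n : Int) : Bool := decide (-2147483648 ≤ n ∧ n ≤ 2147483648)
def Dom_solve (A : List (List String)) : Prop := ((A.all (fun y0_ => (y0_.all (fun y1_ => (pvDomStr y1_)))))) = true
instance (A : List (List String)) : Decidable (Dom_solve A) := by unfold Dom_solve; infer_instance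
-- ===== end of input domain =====

-- B replaces A's per-letter backward fills and index-copy loops by per-row accumulator
-- scans and a top-down previous-row scan; A mutates its argument in place, B builds a
-- new grid, so the equivalence proved here is about the RETURN value only.

-- ===== PORT A =====
-- all_question_marks
def allQ : List String → Bool
  | [] => true
  | x :: xs => if x ≠ "?" then false else allQ xs

-- fill_previous(i, c, row): fuel k = current index + 1; fills backwards while '?'
def fillPrevLoop (c : String) : List String → Nat → List String
  | row, 0 => row
  | row, k + 1 => if row.getD k "" = "?" then fillPrevLoop c (row.set k c) k else row

-- first loop of fill_row: for i, c in enumerate(row): if c != '?': fill_previous(i, c, row)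
def phase1 (row : List String) : List String :=
  (List.range row.length).foldl
    (fun r i => if r.getD i "" ≠ "?" then fillPrevLoop (r.getD i "") r i else r) row

-- inner copy loop: for j in range(i+1, len(row)): row[j] = row[i]
def fillRest (row : List String) (k : Nat) : List String :=
  (List.range' (k + 1) (row.length - (k + 1))).foldl (fun r j => r.set j (r.getD k "")) row

-- second loop of fill_row: for i in range(len(row)-1, -1, -1): … break
def phase2 : List String → Nat → List String
  | row, 0 => row
  | row, k + 1 => if row.getD k "" ≠ "?" then fillRest row k else phase2 row k

def fillRow (row : List String) : List String :=
  let g := phase1 row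
  phase2 g g.length

-- i = 0; while all_question_marks(A[i]): i += 1   (Python raises IndexError past the
-- end; the port returns A.length there — excluded by Pre_solve)
def firstNonQ : List (List String) → Nat
  | [] => 0
  | r :: rs => if allQ r then firstNonQ rs + 1 else 0

def solve (A : List (List String)) : List (List String) :=
  let A1 := A.map (fun row => if allQ row then row else fillRow row)
  let i := firstNonQ A1
  -- for j in range(0, i): A[j] = [x for x in A[i]]   (list copy is identity on Lean lists)
  let A2 := (List.range i).foldl (fun g j => g.set j (g.getD i [])) A1
  -- for j in range(i, len(A)): if all_question_marks(A[j]): A[j] = [x for x in A[j-1]]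
  (List.range' i (A1.length - i)).foldl
    (fun g j => if allQ (g.getD j []) then g.set j (g.getD (j - 1) []) else g) A2

-- ===== PORT B =====
-- any(c != '?' for c in r)
def hasLetter (r : List String) : Bool := r.any (fun c => c != "?")

-- right-to-left scan of horiz; l0 is the accumulator 'last' arriving from the right end
def p1g (l0 : String) : List String → List String × String
  | [] => ([], l0)
  | x :: xs =>
      let r := p1g l0 xs
      if x ≠ "?" then (x :: r.1, x) else (r.2 :: r.1, r.2)

-- left-to-right scan of horiz with accumulator 'last'
def p2 (last : String) : List String → List String
  | [] => []
  | x :: xs => if x ≠ "?" then x :: p2 x xs else last :: p2 last xs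

def horiz (row : List String) : List String := p2 "?" (p1g "?" row).1

-- the final loop: cur = row if it has a letter else prev
def vert (prev : List String) : List (List String) → List (List String)
  | [] => []
  | r :: rs => let cur := if hasLetter r then r else prev
               cur :: vert cur rs

def solve_alt (A : List (List String)) : List (List String) :=
  let rows := A.map (fun r => if hasLetter r then horiz r else r)
  match rows.find? hasLetter with
  | none => rows  -- Python B raises StopIteration here; outside Pre_solve
  | some f => vert f rows

-- ===== PRECONDITION & SPEC =====
-- Pre_ excludes exactly the grids with no non-'?' cell anywhere (including the empty
-- grid): there Python A raises IndexError (and Python B raises StopIteration).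
def Pre_solve (A : List (List String)) : Prop := ∃ r ∈ A, ∃ c ∈ r, c ≠ "?"
instance (A : List (List String)) : Decidable (Pre_solve A) := by unfold Pre_solve; infer_instance

def pvWitness_solve : List (List String) := [["?", "b"], ["?", "?"]]

def Spec_solve (A : List (List String)) (out : List (List String)) : Prop := out = solve_alt A
instance (A : List (List String)) (out : List (List String)) : Decidable (Spec_solve A out) := by unfold Spec_solve; infer_instance

-- ===== CLAIM (what is proved, stated in full; the proofs are below) =====
def Claim_equal_solve : Prop := ∀ (A : List (List String)), Dom_solve A → Pre_solve A → Spec_solve A (solve A)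

-- ===== LEMMAS AND PROOFS =====

theorem hasLetter_eq_not_allQ (r : List String) : hasLetter r = !allQ r := by
  induction r with
  | nil => rfl
  | cons x xs ih =>
      by_cases h : x = "?" <;> simp [hasLetter, allQ, h, List.any_cons] at * <;> simp [← ih]

theorem allQ_false_of_mem {r : List String} {c : String} (hc : c ∈ r) (hne : c ≠ "?") :
    allQ r = false := by
  induction r with
  | nil => cases hc
  | cons x xs ih =>
      rcases List.mem_cons.mp hc with h | h
      · subst h; simp [allQ, hne]
      · by_cases hx : x = "?" <;> simp [allQ, hx, ih h]

theorem p1g_length (l0 : String) (xs : List String) : ((p1g l0 xs).1).length = xs.length := by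
  induction xs with
  | nil => rfl
  | cons x xs ih => by_cases h : x = "?" <;> simp [p1g, h, ih]

theorem p1g_append (l0 : String) (xs ys : List String) :
    p1g l0 (xs ++ ys) = ((p1g (p1g l0 ys).2 xs).1 ++ (p1g l0 ys).1, (p1g (p1g l0 ys).2 xs).2) := by
  induction xs with
  | nil => simp [p1g]
  | cons x xs ih => by_cases h : x = "?" <;> simp [p1g, h, ih]

theorem p1g_replicate (k : Nat) : p1g "?" (List.replicate k "?") = (List.replicate k "?", "?") := by
  induction k with
  | zero => rfl
  | succ k ih => simp [List.replicate_succ, p1g, ih]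

theorem p1g_noQ (l0 : String) (xs : List String) (h : l0 ≠ "?") :
    "?" ∉ (p1g l0 xs).1 ∧ (p1g l0 xs).2 ≠ "?" := by
  induction xs with
  | nil => simpa [p1g] using h
  | cons x xs ih =>
      obtain ⟨ih1, ih2⟩ := ih
      by_cases hx : x = "?"
      · subst hx
        constructor
        · intro hm
          simp [p1g] at hm
          rcases hm with he | he
          · exact ih2 he.symm
          · exact ih1 he
        · simpa [p1g] using ih2
      · constructor
        · intro hm
          simp [p1g, hx] at hm
          rcases hm with he | he
          · exact hx he.symm
          · exact ih1 he
        · simpa [p1g, hx] using hx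

theorem decomp_row {row : List String} (h : allQ row = false) :
    ∃ xs c k, c ≠ "?" ∧ row = xs ++ c :: List.replicate k "?" := by
  induction row using List.reverseRecOn with
  | nil => simp [allQ] at h
  | append_singleton row y ih =>
      by_cases hy : y = "?"
      · subst hy
        have hr : allQ row = false := by
          by_contra hq
          have : allQ row = true := by simpa using hq
          -- allQ (row ++ ["?"]) follows from allQ row
          have : allQ (row ++ ["?"]) = true := by
            clear h ih hq
            induction row with
            | nil => rfl
            | cons x xs ihh =>
                by_cases hx : x = "?" <;> simp_all [allQ]
          simp [this] at h
        obtain ⟨xs, c, k, hc, he⟩ := ih hr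
        exact ⟨xs, c, k + 1, hc, by simp [he, List.replicate_succ']⟩
      · exact ⟨row, y, 0, hy, by simp⟩

theorem set_append_length {α : Type} (l : List α) (x v : α) (t : List α) :
    (l ++ x :: t).set l.length v = l ++ v :: t := by
  induction l with
  | nil => rfl
  | cons a l ih => simp [ih]

theorem getD_append_length {α : Type} (l : List α) (x : α) (t : List α) (d : α) :
    (l ++ x :: t).getD l.length d = x := by
  induction l with
  | nil => rfl
  | cons a l ih => simpa using ih

-- fill_previous, run at the index just after prefix xs, turns the pass-so-far (p1g "?")
-- of xs into its c-bottomed version (p1g c)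
theorem fillPrev_eq (xs : List String) : ∀ zs c, c ≠ "?" →
    fillPrevLoop c ((p1g "?" xs).1 ++ zs) xs.length = (p1g c xs).1 ++ zs := by
  induction xs using List.reverseRecOn with
  | nil => intro zs c h; simp [p1g, fillPrevLoop]
  | append_singleton xs y ih =>
      intro zs c hc
      by_cases hy : y = "?"
      · subst hy
        have h2 : (p1g "?" (xs ++ ["?"])).1 = (p1g "?" xs).1 ++ ["?"] := by
          have := p1g_append "?" xs ["?"]
          simp [p1g] at this
          simp [this]
        have h3 : (p1g c (xs ++ ["?"])).1 = (p1g c xs).1 ++ [c] := by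
          have := p1g_append c xs ["?"]
          simp [p1g] at this
          simp [this]
        have hlen : (xs ++ ["?"]).length = (p1g "?" xs).1.length + 1 := by
          simp [p1g_length]
        rw [h2, hlen]
        simp only [fillPrevLoop, List.append_assoc, List.singleton_append]
        rw [getD_append_length, if_pos rfl, set_append_length, p1g_length]
        rw [ih (c :: zs) c hc, h3]
        simp
      · have h2 : (p1g "?" (xs ++ [y])).1 = (p1g y xs).1 ++ [y] := by
          have := p1g_append "?" xs [y]
          simp [p1g, hy] at this
          simp [this]
        have h3 : (p1g c (xs ++ [y])).1 = (p1g y xs).1 ++ [y] := by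
          have := p1g_append c xs [y]
          simp [p1g, hy] at this
          simp [this]
        have hlen : (xs ++ [y]).length = (p1g y xs).1.length + 1 := by
          simp [p1g_length]
        rw [h2, hlen]
        simp only [fillPrevLoop, List.append_assoc, List.singleton_append]
        rw [getD_append_length, if_neg hy, h3]
        simp

theorem phase1_inv (row : List String) : ∀ m, m ≤ row.length →
    (List.range m).foldl
        (fun r i => if r.getD i "" ≠ "?" then fillPrevLoop (r.getD i "") r i else r) row =
      (p1g "?" (row.take m)).1 ++ row.drop m := by
  intro m
  induction m with
  | zero => simp [p1g]
  | succ m ih =>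
      intro hm
      have hm' : m < row.length := by omega
      rw [List.range_succ, List.foldl_append, ih (by omega)]
      have hd : row.drop m = row[m] :: row.drop (m + 1) := List.drop_eq_getElem_cons hm'
      have hlen : (p1g "?" (row.take m)).1.length = m := by
        rw [p1g_length, List.length_take]; omega
      have htk : row.take (m + 1) = row.take m ++ [row[m]] := by
        rw [List.take_add_one, List.getElem?_eq_getElem hm']
        rfl
      simp only [List.foldl_cons, List.foldl_nil, hd]
      have hget : ((p1g "?" (row.take m)).1 ++ row[m] :: row.drop (m + 1)).getD m "" = row[m] := by
        have := getD_append_length (p1g "?" (row.take m)).1 row[m] (row.drop (m + 1)) ""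
        rwa [hlen] at this
      rw [hget]
      by_cases hq : row[m] = "?"
      · rw [if_neg (by simp [hq])]
        have hp : (p1g "?" (row.take (m + 1))).1 = (p1g "?" (row.take m)).1 ++ ["?"] := by
          rw [htk, hq, p1g_append "?" (row.take m) ["?"]]
          simp [p1g]
        rw [hp]
        simp [hq]
      · rw [if_pos (by simp [hq])]
        have hf := fillPrev_eq (row.take m) (row[m] :: row.drop (m + 1)) row[m] hq
        have hlt : (row.take m).length = m := by rw [List.length_take]; omega
        rw [hlt] at hf
        rw [hf]
        have hp : (p1g "?" (row.take (m + 1))).1 = (p1g row[m] (row.take m)).1 ++ [row[m]] := by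
          rw [htk, p1g_append "?" (row.take m) [row[m]]]
          simp [p1g, hq]
        rw [hp]
        simp

theorem phase1_eq (row : List String) : phase1 row = (p1g "?" row).1 := by
  have := phase1_inv row row.length le_rfl
  simpa [phase1] using this

theorem p2_replicate (l : String) (k : Nat) : p2 l (List.replicate k "?") = List.replicate k l := by
  induction k generalizing l with
  | zero => rfl
  | succ k ih => simp [List.replicate_succ, p2, ih]

theorem p2_append_noQ (us : List String) : ∀ l0 zs, "?" ∉ us →
    p2 l0 (us ++ zs) = us ++ p2 (us.getLastD l0) zs := by
  induction us with
  | nil => simp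
  | cons u us ih =>
      intro l0 zs h
      have hu : u ≠ "?" := fun he => h (by simp [he])
      rw [List.cons_append]
      simp only [p2, if_pos hu]
      rw [ih u zs (fun hq => h (by simp [hq])), List.getLastD_cons]
      simp

theorem getD_replicate_lt {α : Type} (x d : α) {k j : Nat} (h : j < k) :
    (List.replicate k x).getD j d = x := by
  rw [List.getD_eq_getElem _ _ (by simpa using h)]
  simp

theorem fill_fold (K : Nat) : ∀ (pre : List String) (i0 : Nat) (c : String), i0 < pre.length →
    pre.getD i0 "" = c →
    (List.range' pre.length K).foldl (fun r j => r.set j (r.getD i0 ""))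
        (pre ++ List.replicate K "?") = pre ++ List.replicate K c := by
  induction K with
  | zero => intro pre i0 c h hc; simp
  | succ K ih =>
      intro pre i0 c h hc
      rw [List.range'_succ]
      simp only [List.foldl_cons]
      have hg : (pre ++ List.replicate (K + 1) "?").getD i0 "" = c := by
        rw [List.getD_append _ _ _ _ h]; exact hc
      rw [hg]
      have hset : (pre ++ List.replicate (K + 1) "?").set pre.length c =
          (pre ++ [c]) ++ List.replicate K "?" := by
        rw [List.replicate_succ, set_append_length]; simp
      rw [hset]
      have hi' : i0 < (pre ++ [c]).length := by simp; omega
      have hc' : (pre ++ [c]).getD i0 "" = c := by rw [List.getD_append _ _ _ _ h]; exact hc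
      have := ih (pre ++ [c]) i0 c hi' hc'
      rw [show pre.length + 1 = (pre ++ [c]).length by simp, this]
      simp [List.replicate_succ]

theorem phase2_skip (us' : List String) (K : Nat) : ∀ k, k ≤ K →
    phase2 (us' ++ List.replicate K "?") (us'.length + k) =
      phase2 (us' ++ List.replicate K "?") us'.length := by
  intro k
  induction k with
  | zero => intro _; rfl
  | succ j ih =>
      intro hk
      have hget : (us' ++ List.replicate K "?").getD (us'.length + j) "" = "?" := by
        rw [List.getD_append_right _ _ _ _ (by omega)]
        rw [show us'.length + j - us'.length = j by omega]
        exact getD_replicate_lt _ _ (by omega)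
      show phase2 (us' ++ List.replicate K "?") ((us'.length + j) + 1) = _
      simp only [phase2, hget]
      simpa using ih (by omega)

theorem phase2_eq (us : List String) (c : String) (k : Nat) (hc : c ≠ "?") :
    phase2 ((us ++ [c]) ++ List.replicate k "?") ((us ++ [c]).length + k) =
      (us ++ [c]) ++ List.replicate k c := by
  rw [phase2_skip (us ++ [c]) k k le_rfl]
  have hlen : (us ++ [c]).length = us.length + 1 := by simp
  rw [hlen]
  have hget : ((us ++ [c]) ++ List.replicate k "?").getD us.length "" = c := by
    rw [List.append_assoc, List.singleton_append, getD_append_length]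
  simp only [phase2, hget, if_pos hc]
  rw [fillRest]
  have hcnt : ((us ++ [c]) ++ List.replicate k "?").length - (us.length + 1) = k := by
    simp
    omega
  rw [hcnt]
  have hc' : (us ++ [c]).getD us.length "" = c := getD_append_length us c [] ""
  have := fill_fold k (us ++ [c]) us.length c (by simp) hc'
  rw [hlen] at this
  exact this

theorem fillRow_horiz_decomp {row : List String} (h : allQ row = false) :
    ∃ us c k, c ≠ "?" ∧ fillRow row = (us ++ [c]) ++ List.replicate k c ∧
      horiz row = (us ++ [c]) ++ List.replicate k c := by
  obtain ⟨xs, c, k, hc, hrow⟩ := decomp_row h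
  have h2 : p1g "?" (c :: List.replicate k "?") = (c :: List.replicate k "?", c) := by
    simp [p1g, p1g_replicate, hc]
  have hp1 : (p1g "?" row).1 = ((p1g c xs).1 ++ [c]) ++ List.replicate k "?" := by
    rw [hrow, p1g_append "?" xs (c :: List.replicate k "?"), h2]
    simp
  refine ⟨(p1g c xs).1, c, k, hc, ?_, ?_⟩
  · show phase2 (phase1 row) (phase1 row).length = _
    rw [phase1_eq, hp1]
    rw [show (((p1g c xs).1 ++ [c]) ++ List.replicate k "?").length =
        ((p1g c xs).1 ++ [c]).length + k by simp; omega]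
    exact phase2_eq (p1g c xs).1 c k hc
  · rw [horiz, hp1]
    have hnoq : "?" ∉ (p1g c xs).1 ++ [c] := by
      intro hm
      rcases List.mem_append.mp hm with hm | hm
      · exact (p1g_noQ c xs hc).1 hm
      · simp at hm; exact hc hm.symm
    rw [p2_append_noQ ((p1g c xs).1 ++ [c]) "?" (List.replicate k "?") hnoq]
    rw [List.getLastD_concat, p2_replicate]

theorem fillRow_eq_horiz {row : List String} (h : allQ row = false) :
    fillRow row = horiz row := by
  obtain ⟨us, c, k, _, h1, h2⟩ := fillRow_horiz_decomp h
  rw [h1, h2]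

theorem allQ_fillRow {row : List String} (h : allQ row = false) :
    allQ (fillRow row) = false := by
  obtain ⟨us, c, k, hc, h1, _⟩ := fillRow_horiz_decomp h
  rw [h1]
  exact allQ_false_of_mem (by simp) hc

theorem rows_eq (A : List (List String)) :
    A.map (fun row => if allQ row then row else fillRow row) =
      A.map (fun r => if hasLetter r then horiz r else r) := by
  apply List.map_congr_left
  intro r _
  by_cases h : allQ r
  · simp [h, hasLetter_eq_not_allQ]
  · have h' : allQ r = false := by simpa using h
    simp [h', hasLetter_eq_not_allQ, fillRow_eq_horiz h']

theorem firstNonQ_lt {L : List (List String)} (h : ∃ r ∈ L, allQ r = false) :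
    firstNonQ L < L.length := by
  induction L with
  | nil => simp at h
  | cons r rs ih =>
      by_cases hr : allQ r
      · obtain ⟨s, hs, hsq⟩ := h
        rcases List.mem_cons.mp hs with he | he
        · subst he; simp [hr] at hsq
        · have := ih ⟨s, he, hsq⟩
          simp [firstNonQ, hr]; omega
      · simp [firstNonQ, hr]

theorem find?_firstNonQ {L : List (List String)} (h : firstNonQ L < L.length) :
    L.find? hasLetter = some (L.getD (firstNonQ L) []) := by
  induction L with
  | nil => simp [firstNonQ] at h
  | cons r rs ih =>
      by_cases hr : allQ r
      · have h' : firstNonQ rs < rs.length := by simp [firstNonQ, hr] at h; omega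
        have hl : hasLetter r = false := by simp [hasLetter_eq_not_allQ, hr]
        simp [List.find?, hl, firstNonQ, hr, ih h']
      · have hl : hasLetter r = true := by simp [hasLetter_eq_not_allQ, hr]
        simp [List.find?, hl, firstNonQ, hr]

theorem allQ_at_firstNonQ {L : List (List String)} (h : firstNonQ L < L.length) :
    allQ (L.getD (firstNonQ L) []) = false := by
  induction L with
  | nil => simp [firstNonQ] at h
  | cons r rs ih =>
      by_cases hr : allQ r
      · have h' : firstNonQ rs < rs.length := by simp [firstNonQ, hr] at h; omega
        simpa [firstNonQ, hr] using ih h'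
      · simpa [firstNonQ, hr] using hr

theorem take_allQ {L : List (List String)} : ∀ r ∈ L.take (firstNonQ L), allQ r = true := by
  induction L with
  | nil => simp
  | cons q qs ih =>
      by_cases hq : allQ q
      · intro r hr
        rw [show firstNonQ (q :: qs) = firstNonQ qs + 1 by simp [firstNonQ, hq],
          List.take_succ_cons] at hr
        rcases List.mem_cons.mp hr with he | he
        · rw [he]; exact hq
        · exact ih r he
      · intro r hr
        simp [firstNonQ, hq] at hr

theorem range_fold_set {L : List (List String)} : ∀ m i0, m ≤ i0 → i0 < L.length →
    (List.range m).foldl (fun g j => g.set j (g.getD i0 [])) L =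
      List.replicate m (L.getD i0 []) ++ L.drop m := by
  intro m
  induction m with
  | zero => simp
  | succ m ih =>
      intro i0 hm hi
      rw [List.range_succ, List.foldl_append, ih i0 (by omega) hi]
      simp only [List.foldl_cons, List.foldl_nil]
      have hm' : m < L.length := by omega
      have hget : (List.replicate m (L.getD i0 []) ++ L.drop m).getD i0 [] = L.getD i0 [] := by
        rw [List.getD_append_right _ _ _ _ (by simp; omega)]
        simp only [List.length_replicate]
        rw [List.getD_eq_getElem?_getD, List.getD_eq_getElem?_getD, List.getElem?_drop]
        rw [show m + (i0 - m) = i0 by omega]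
      rw [hget]
      have hd : L.drop m = L[m] :: L.drop (m + 1) := List.drop_eq_getElem_cons hm'
      rw [hd]
      have hset := set_append_length (List.replicate m (L.getD i0 [])) L[m] (L.getD i0 []) (L.drop (m + 1))
      rw [List.length_replicate] at hset
      rw [hset, List.replicate_succ']
      simp

theorem scan_fold (suf : List (List String)) : ∀ pre : List (List String), pre ≠ [] →
    (List.range' pre.length suf.length).foldl
        (fun g j => if allQ (g.getD j []) then g.set j (g.getD (j - 1) []) else g) (pre ++ suf) =
      pre ++ vert (pre.getD (pre.length - 1) []) suf := by
  induction suf with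
  | nil => intro pre h; simp [vert]
  | cons r rs ih =>
      intro pre hpre
      have hp0 : 0 < pre.length := List.length_pos_iff.mpr hpre
      rw [List.length_cons, List.range'_succ]
      simp only [List.foldl_cons]
      have hget : (pre ++ r :: rs).getD pre.length [] = r := getD_append_length pre r rs []
      rw [hget]
      by_cases hr : allQ r
      · rw [if_pos hr]
        have hprev : (pre ++ r :: rs).getD (pre.length - 1) [] = pre.getD (pre.length - 1) [] :=
          List.getD_append _ _ _ _ (by omega)
        rw [hprev, set_append_length pre r (pre.getD (pre.length - 1) []) rs]
        rw [show pre ++ pre.getD (pre.length - 1) [] :: rs =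
            (pre ++ [pre.getD (pre.length - 1) []]) ++ rs by simp]
        rw [show pre.length + 1 = (pre ++ [pre.getD (pre.length - 1) []]).length by simp]
        rw [ih (pre ++ [pre.getD (pre.length - 1) []]) (by simp)]
        have hg2 : (pre ++ [pre.getD (pre.length - 1) []]).getD
            ((pre ++ [pre.getD (pre.length - 1) []]).length - 1) [] =
            pre.getD (pre.length - 1) [] := by
          rw [show (pre ++ [pre.getD (pre.length - 1) []]).length - 1 = pre.length by simp]
          exact getD_append_length pre _ [] []
        rw [hg2]
        have hv : vert (pre.getD (pre.length - 1) []) (r :: rs) =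
            pre.getD (pre.length - 1) [] :: vert (pre.getD (pre.length - 1) []) rs := by
          simp [vert, hasLetter_eq_not_allQ, hr]
        rw [hv]
        simp
      · rw [if_neg hr]
        rw [show pre ++ r :: rs = (pre ++ [r]) ++ rs by simp]
        rw [show pre.length + 1 = (pre ++ [r]).length by simp]
        rw [ih (pre ++ [r]) (by simp)]
        have hg2 : (pre ++ [r]).getD ((pre ++ [r]).length - 1) [] = r := by
          rw [show (pre ++ [r]).length - 1 = pre.length by simp]
          exact getD_append_length pre r [] []
        rw [hg2]
        have hv : vert (pre.getD (pre.length - 1) []) (r :: rs) = r :: vert r rs := by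
          have : hasLetter r = true := by simp [hasLetter_eq_not_allQ, hr]
          simp [vert, this]
        rw [hv]
        simp

theorem vert_allQ_prefix (v : List String) (qs : List (List String))
    (h : ∀ r ∈ qs, allQ r = true) (suf : List (List String)) :
    vert v (qs ++ suf) = List.replicate qs.length v ++ vert v suf := by
  induction qs with
  | nil => simp
  | cons q qs ih =>
      have hq : hasLetter q = false := by
        simp [hasLetter_eq_not_allQ, h q (by simp)]
      simp [vert, hq, List.replicate_succ, ih (fun r hr => h r (by simp [hr]))]

-- ===== VERDICT (by name: the statement is the Claim_ definition above) =====
theorem solve_spec : Claim_equal_solve := by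
  intro A _ hpre
  show solve A = solve_alt A
  simp only [solve, solve_alt]
  rw [← rows_eq A]
  set L := A.map (fun row => if allQ row then row else fillRow row) with hL
  have hex : ∃ r ∈ L, allQ r = false := by
    obtain ⟨r, hr, c, hc, hcq⟩ := hpre
    have h1 : allQ r = false := allQ_false_of_mem hc hcq
    refine ⟨fillRow r, ?_, allQ_fillRow h1⟩
    rw [hL]
    refine List.mem_map.mpr ⟨r, hr, ?_⟩
    simp [h1]
  have hi : firstNonQ L < L.length := firstNonQ_lt hex
  set i := firstNonQ L with hidef
  set v := L.getD i [] with hvdef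
  have hv : allQ v = false := allQ_at_firstNonQ hi
  rw [find?_firstNonQ hi, ← hidef, ← hvdef]
  rw [range_fold_set i i le_rfl hi]
  have hd : L.drop i = v :: L.drop (i + 1) := by
    rw [List.drop_eq_getElem_cons hi, ← List.getD_eq_getElem L [] hi]
  rw [show L.length - i = (L.length - i - 1) + 1 by omega, List.range'_succ]
  simp only [List.foldl_cons]
  have hget0 : (List.replicate i v ++ L.drop i).getD i [] = v := by
    rw [hd]
    have := getD_append_length (List.replicate i v) v (L.drop (i + 1)) []
    rwa [List.length_replicate] at this
  rw [hget0, if_neg (by simp [hv])]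
  rw [show List.replicate i v ++ L.drop i = (List.replicate i v ++ [v]) ++ L.drop (i + 1) by
    rw [hd]; simp]
  rw [show L.length - i - 1 = (L.drop (i + 1)).length by rw [List.length_drop]; omega]
  have hsc := scan_fold (L.drop (i + 1)) (List.replicate i v ++ [v]) (by simp)
  rw [show (List.replicate i v ++ [v]).length = i + 1 by simp] at hsc
  have hgp : (List.replicate i v ++ [v]).getD (i + 1 - 1) [] = v := by
    rw [show i + 1 - 1 = i by omega]
    have := getD_append_length (List.replicate i v) v [] []
    rwa [List.length_replicate] at this
  rw [hgp] at hsc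
  rw [hsc]
  conv_rhs => rw [show L = L.take i ++ (v :: L.drop (i + 1)) by rw [← hd]; simp]
  rw [vert_allQ_prefix v (L.take i) (by intro r hr; exact take_allQ r hr) (v :: L.drop (i + 1))]
  rw [show vert v (v :: L.drop (i + 1)) = v :: vert v (L.drop (i + 1)) by
    simp [vert, hasLetter_eq_not_allQ, hv]]
  rw [show (L.take i).length = i by rw [List.length_take]; omega]
  simp
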